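-- pv_equiv track=rewrite | github.com/oscarlidenbrock/freecodecamp | challenges/2026-02/28_add-punctuation.py | add_punctuation
-- ===== SOURCE A (Python) =====
-- def add_punctuation(sentence: str) -> str:
--     """
--     Return the sentences with end sentence dots.
--     :param sentence: Sentences in one string.
--     :return: Sentences with dots.
--     """
--
--     result = ""
--     last_character = ""
--
--     for word in sentence:
--         if ord(word) >= ord("A") and ord(word) <= ord("Z") and last_character == " ":
--             # add end line dot
--             result = result[:-1] + ". " + word
--         else:
--             result += word
--
--         last_character = word
--
--     # Add final dot
--     result += "."
--
--     return result
-- ===== SOURCE B (Python) =====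
-- def add_punctuation(sentence: str) -> str:
--     # Forward one-pass scan with lookahead: when a space is immediately
--     # followed by an uppercase ASCII letter, emit ". " plus that letter and
--     # skip both; otherwise copy the character. Append the final dot once.
--     out = []
--     i = 0
--     n = len(sentence)
--     while i < n:
--         if sentence[i] == ' ' and i + 1 < n and 'A' <= sentence[i + 1] <= 'Z':
--             out.append('. ')
--             out.append(sentence[i + 1])
--             i += 2
--         else:
--             out.append(sentence[i])
--             i += 1
--     out.append('.')
--     return ''.join(out)
-- ===== Notes on version B (the rewrite author's own statement) =====
-- stated objective: alternative
-- what changed: Replaces A's backward-looking accumulator that patches the already-built result with result[:-1] slicing on each space-capital boundary by a forward lookahead scan that consumes the space and capital together and never rewrites emitted output.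
import Mathlib
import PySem

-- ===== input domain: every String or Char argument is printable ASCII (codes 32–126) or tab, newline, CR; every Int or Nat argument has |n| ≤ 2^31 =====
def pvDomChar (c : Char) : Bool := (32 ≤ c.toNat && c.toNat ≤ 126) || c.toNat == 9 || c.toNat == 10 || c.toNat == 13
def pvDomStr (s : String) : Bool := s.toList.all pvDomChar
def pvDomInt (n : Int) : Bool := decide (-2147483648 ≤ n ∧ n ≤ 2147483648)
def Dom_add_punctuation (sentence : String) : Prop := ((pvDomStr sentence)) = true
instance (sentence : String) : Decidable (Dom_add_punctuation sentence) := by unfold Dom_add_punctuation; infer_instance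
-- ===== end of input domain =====

-- B replaces A's backward-looking accumulator (which patches the result with
-- [:-1]) by a forward scan with one-character lookahead; same return value,
-- no surgery on already-emitted output (objective: alternative).

-- ===== PORT A =====
-- A's loop: state = (result, last_character); when the current char is an
-- uppercase ASCII letter and last_character == " ", result = result[:-1] + ". " + word.
def pvAGo : List Char → List Char → List Char → List Char
  | [], res, _ => res
  | c :: cs, res, last =>
    if (65 ≤ c.toNat ∧ c.toNat ≤ 90) ∧ last = [' ']
    then pvAGo cs (res.dropLast ++ ['.', ' ', c]) [c]
    else pvAGo cs (res ++ [c]) [c]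

def add_punctuation (sentence : String) : String :=
  String.mk (pvAGo sentence.toList [] [] ++ ['.'])

-- ===== PORT B =====
-- B's while loop with lookahead: space followed by A–Z consumes two chars.
def pvBScan : List Char → List Char
  | [] => []
  | [c] => [c]
  | c :: d :: rest =>
    if c = ' ' ∧ 'A' ≤ d ∧ d ≤ 'Z'
    then '.' :: ' ' :: d :: pvBScan rest
    else c :: pvBScan (d :: rest)

def add_punctuation_alt (sentence : String) : String :=
  String.mk (pvBScan sentence.toList ++ ['.'])

-- ===== PRECONDITION & SPEC =====
def Spec_add_punctuation (sentence : String) (out : String) : Prop := out = add_punctuation_alt sentence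
instance (sentence : String) (out : String) : Decidable (Spec_add_punctuation sentence out) := by unfold Spec_add_punctuation; infer_instance

-- ===== CLAIM (what is proved, stated in full; the proofs are below) =====
def Claim_equal_add_punctuation : Prop := ∀ (sentence : String), Dom_add_punctuation sentence → Spec_add_punctuation sentence (add_punctuation sentence)

-- ===== LEMMAS AND PROOFS =====

-- Common characterisation: the processed tail given the previous character.
def pvHH : Char → List Char → List Char
  | c, [] => [c]
  | c, d :: cs =>
    if (65 ≤ d.toNat ∧ d.toNat ≤ 90) ∧ c = ' '
    then '.' :: ' ' :: pvHH d cs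
    else c :: pvHH d cs

theorem pvUpper_iff (c : Char) : (65 ≤ c.toNat ∧ c.toNat ≤ 90) ↔ ('A' ≤ c ∧ c ≤ 'Z') := by
  rw [Char.le_def, Char.le_def, UInt32.le_iff_toNat_le, UInt32.le_iff_toNat_le]
  exact Iff.rfl

theorem pvAGo_eq (cs : List Char) : ∀ (res : List Char) (c : Char),
    pvAGo cs (res ++ [c]) [c] = res ++ pvHH c cs := by
  induction cs with
  | nil => intro res c; simp [pvAGo, pvHH]
  | cons d cs ih =>
    intro res c
    by_cases h : (65 ≤ d.toNat ∧ d.toNat ≤ 90) ∧ c = ' '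
    · obtain ⟨h1, hc⟩ := h; subst hc
      rw [show pvAGo (d :: cs) (res ++ [' ']) [' ']
            = pvAGo cs ((res ++ [' ']).dropLast ++ ['.', ' ', d]) [d] from by
            simp [pvAGo, h1]]
      rw [List.dropLast_concat]
      rw [show res ++ ['.', ' ', d] = (res ++ ['.', ' ']) ++ [d] from by simp, ih]
      simp [pvHH, h1]
    · have hcond : ¬ ((65 ≤ d.toNat ∧ d.toNat ≤ 90) ∧ [c] = [' ']) := by
        intro hx; exact h ⟨hx.1, by simpa using hx.2⟩
      rw [show pvAGo (d :: cs) (res ++ [c]) [c]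
            = pvAGo cs ((res ++ [c]) ++ [d]) [d] from by
            simp only [pvAGo]; rw [if_neg hcond]]
      rw [ih]
      simp [pvHH, h]

theorem pvBScan_ne_space (c : Char) (l : List Char) (hc : c ≠ ' ') :
    pvBScan (c :: l) = c :: pvBScan l := by
  cases l with
  | nil => simp [pvBScan]
  | cons d r => simp [pvBScan, hc]

theorem pvBScan_eq_hh (cs : List Char) : ∀ c : Char, pvBScan (c :: cs) = pvHH c cs := by
  induction cs with
  | nil => intro c; simp [pvBScan, pvHH]
  | cons d cs ih =>
    intro c
    by_cases h : (65 ≤ d.toNat ∧ d.toNat ≤ 90) ∧ c = ' '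
    · have hd := (pvUpper_iff d).mp h.1
      have hdne : d ≠ ' ' := by
        intro hx; subst hx; exact absurd h.1 (by decide)
      have hc : c = ' ' := h.2; subst hc
      rw [show pvBScan (' ' :: d :: cs) = '.' :: ' ' :: d :: pvBScan cs from by
            simp [pvBScan, hd.1, hd.2]]
      rw [show pvHH ' ' (d :: cs) = '.' :: ' ' :: pvHH d cs from by simp [pvHH, h.1]]
      rw [← ih d, pvBScan_ne_space d cs hdne]
    · have hB : ¬ (c = ' ' ∧ 'A' ≤ d ∧ d ≤ 'Z') := by
        intro hx; exact h ⟨(pvUpper_iff d).mpr hx.2, hx.1⟩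
      rw [show pvBScan (c :: d :: cs) = c :: pvBScan (d :: cs) from by simp [pvBScan, hB]]
      rw [show pvHH c (d :: cs) = c :: pvHH d cs from by simp [pvHH, h]]
      rw [ih d]

theorem pvMain (l : List Char) : pvAGo l [] [] = pvBScan l := by
  cases l with
  | nil => simp [pvAGo, pvBScan]
  | cons c cs =>
    have : pvAGo (c :: cs) [] [] = pvAGo cs ([] ++ [c]) [c] := by
      simp [pvAGo]
    rw [this, pvAGo_eq cs [] c, pvBScan_eq_hh cs c]
    simp

-- ===== VERDICT (by name: the statement is the Claim_ definition above) =====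
theorem add_punctuation_spec : Claim_equal_add_punctuation := by
  intro sentence _
  unfold Spec_add_punctuation add_punctuation add_punctuation_alt
  rw [pvMain]
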